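-- pv_equiv track=rewrite | github.com/eti-youngreis/KT_Cloud | DB/KT_DB/sarit_yehudit_temp/sql_command.py | _adjust_results_to_schema
-- ===== SOURCE A (Python) =====
-- from typing import Deque, List, Tuple
--
-- def _adjust_results_to_schema(results: List[Tuple], result_columns: List[str], schema_columns: List[str]) -> List[Tuple]:
--     """Adjusts query results to match the schema of the first database.
--
--     Args:
--         results: List of query results.
--         result_columns: List of column names from the query results.
--         schema_columns: List of column names from the first database schema.
--
--     Returns:
--         A list of tuples containing adjusted results.
--     """
--     adjusted_results = []
--     for row in results:
--         adjusted_row = []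
--         for col in schema_columns:
--             if col in result_columns:
--                 adjusted_row.append(row[result_columns.index(col)])
--             else:
--                 adjusted_row.append(None)  # Default value for missing columns
--         adjusted_results.append(tuple(adjusted_row))
--     return adjusted_results
-- ===== SOURCE B (Python) =====
-- def _adjust_results_to_schema(results, result_columns, schema_columns):
--     plan = [result_columns.index(col) if col in result_columns else None
--             for col in schema_columns]
--     return [tuple(row[i] if i is not None else None for i in plan)
--             for row in results]
-- ===== Notes on version B (the rewrite author's own statement) =====
-- stated objective: alternative
-- what changed: B precomputes a projection plan (schema column -> source index or None) in one pass, then remaps each row by flat index lookup, removing the per-row membership test and list.index scan.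
import Mathlib
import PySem

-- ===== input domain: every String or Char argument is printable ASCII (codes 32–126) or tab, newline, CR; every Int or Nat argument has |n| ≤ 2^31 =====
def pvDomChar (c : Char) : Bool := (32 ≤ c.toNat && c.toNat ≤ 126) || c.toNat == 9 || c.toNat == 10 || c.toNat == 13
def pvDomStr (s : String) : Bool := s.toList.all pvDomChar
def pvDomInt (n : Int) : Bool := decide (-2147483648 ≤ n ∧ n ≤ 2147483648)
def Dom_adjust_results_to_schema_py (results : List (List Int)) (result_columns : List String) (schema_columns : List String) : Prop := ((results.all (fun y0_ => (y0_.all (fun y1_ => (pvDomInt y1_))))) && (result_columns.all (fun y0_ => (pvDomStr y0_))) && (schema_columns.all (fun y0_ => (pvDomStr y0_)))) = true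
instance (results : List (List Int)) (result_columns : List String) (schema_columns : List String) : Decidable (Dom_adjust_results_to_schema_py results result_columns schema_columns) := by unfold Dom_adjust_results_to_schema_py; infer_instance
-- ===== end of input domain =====

-- B replaces A's per-row membership test + list.index scan by a projection plan
-- built once over schema_columns, then a flat index remap of each row (alternative decomposition).

-- ===== PORT A =====
-- literal port of A: outer loop appends one adjusted row per result row; inner
-- loop over schema_columns tests membership and calls .index inside the row loop.
def adjust_results_to_schema_py (results : List (List Int)) (result_columns : List String) (schema_columns : List String) : List (List (Option Int)) :=
  results.foldl (fun adjusted_results row =>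
    adjusted_results ++ [
      schema_columns.foldl (fun adjusted_row col =>
        adjusted_row ++ [
          if result_columns.contains col then
            -- row[result_columns.index(col)]; `contains` guarantees index? is some
            PySem.List.pyGet? row (((PySem.List.index? result_columns col).getD 0 : Nat) : Int)
          else none]) []]) []

-- ===== PORT B =====
-- literal port of B: plan first, then a branch-free remap of every row.
def adjust_results_to_schema_py_alt (results : List (List Int)) (result_columns : List String) (schema_columns : List String) : List (List (Option Int)) :=
  let plan : List (Option Nat) := schema_columns.map (fun col => PySem.List.index? result_columns col)
  results.map (fun row => plan.map (fun i? =>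
    match i? with
    | some i => PySem.List.pyGet? row ((i : Nat) : Int)
    | none => none))

-- ===== PRECONDITION & SPEC =====
-- Pre_ excludes exactly the inputs on which Python A raises IndexError:
-- a schema column found in result_columns at an index not shorter than some row.
def Pre_adjust_results_to_schema_py (results : List (List Int)) (result_columns : List String) (schema_columns : List String) : Prop :=
  ∀ row ∈ results, ∀ col ∈ schema_columns,
    ((PySem.List.index? result_columns col).all (fun i => decide (i < row.length))) = true
instance (results : List (List Int)) (result_columns : List String) (schema_columns : List String) : Decidable (Pre_adjust_results_to_schema_py results result_columns schema_columns) := by unfold Pre_adjust_results_to_schema_py; infer_instance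
def pvWitness_adjust_results_to_schema_py : List (List Int) × List String × List String := ([[1, 2]], ["a", "b"], ["b", "c"])

def Spec_adjust_results_to_schema_py (results : List (List Int)) (result_columns : List String) (schema_columns : List String) (out : List (List (Option Int))) : Prop := out = adjust_results_to_schema_py_alt results result_columns schema_columns
instance (results : List (List Int)) (result_columns : List String) (schema_columns : List String) (out : List (List (Option Int))) : Decidable (Spec_adjust_results_to_schema_py results result_columns schema_columns out) := by unfold Spec_adjust_results_to_schema_py; infer_instance

-- ===== CLAIM (what is proved, stated in full; the proofs are below) =====
def Claim_equal_adjust_results_to_schema_py : Prop := ∀ (results : List (List Int)) (result_columns : List String) (schema_columns : List String), Dom_adjust_results_to_schema_py results result_columns schema_columns → Pre_adjust_results_to_schema_py results result_columns schema_columns → Spec_adjust_results_to_schema_py results result_columns schema_columns (adjust_results_to_schema_py results result_columns schema_columns)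

-- ===== LEMMAS AND PROOFS =====

-- append-accumulator fold = map
theorem pv_foldl_push {α β : Type} (f : α → β) (l : List α) (init : List β) :
    l.foldl (fun acc x => acc ++ [f x]) init = init ++ l.map f := by
  induction l generalizing init with
  | nil => simp
  | cons x xs ih => simp [ih]

-- A's per-cell branch equals B's plan lookup, for every column
theorem pv_cell_eq (row : List Int) (result_columns : List String) (col : String) :
    (if result_columns.contains col then
        PySem.List.pyGet? row (((PySem.List.index? result_columns col).getD 0 : Nat) : Int)
      else none)
    = (match PySem.List.index? result_columns col with
       | some i => PySem.List.pyGet? row ((i : Nat) : Int)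
       | none => none) := by
  cases h : PySem.List.index? result_columns col with
  | none =>
    have : col ∉ result_columns := (PySem.List.index?_eq_none_iff _ _).mp h
    simp [this]
  | some i =>
    have hm : col ∈ result_columns := (PySem.List.index?_isSome_iff _ _).mp (by rw [h]; rfl)
    rw [if_pos (by simpa using hm)]
    rfl

-- ===== VERDICT (by name: the statement is the Claim_ definition above) =====
theorem adjust_results_to_schema_py_spec : Claim_equal_adjust_results_to_schema_py := by
  intro results result_columns schema_columns _ _
  unfold Spec_adjust_results_to_schema_py adjust_results_to_schema_py adjust_results_to_schema_py_alt
  rw [pv_foldl_push]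
  simp only [List.nil_append, List.map_map]
  refine List.map_congr_left (fun row _ => ?_)
  rw [pv_foldl_push]
  simp only [List.nil_append]
  exact List.map_congr_left (fun col _ => pv_cell_eq row result_columns col)
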